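-- pv_equiv track=rewrite | github.com/heeeeeseok/study | Algorithm/Programmers/숫자타자대회.py | cal_weight
-- ===== SOURCE A (Python) =====
-- keyboard = {1: (0, 0), 2: (0, 1), 3: (0, 2),
--             4: (1, 0), 5: (1, 1), 6: (1, 2),
--             7: (2, 0), 8: (2, 1), 9: (2, 2),
--             0: (3, 1)}
--
-- def cal_weight(src, dest):
--     weight = 0
--     src_pos = keyboard[src]
--     dest_pos = keyboard[dest]
--
--     diff_y = abs(src_pos[0] - dest_pos[0])
--     diff_x = abs(src_pos[1] - dest_pos[1])
--
--     if diff_x == 0 and diff_y == 0: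
--         return 1
--     elif diff_x == 0:
--         return 2 * diff_y
--     elif diff_y == 0:
--         return 2 * diff_x
--     else:
--         while diff_y != 0 and diff_x != 0:
--             weight += 3
--             diff_x -= 1
--             diff_y -= 1
--         if diff_x == 0:
--             weight += (2 * diff_y)
--         elif diff_y == 0:
--             weight += (2 * diff_x)
--         return weight
-- ===== SOURCE B (Python) =====
-- keyboard = {1: (0, 0), 2: (0, 1), 3: (0, 2),
--             4: (1, 0), 5: (1, 1), 6: (1, 2),
--             7: (2, 0), 8: (2, 1), 9: (2, 2),
--             0: (3, 1)}
--
-- def cal_weight(src, dest):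
--     sy, sx = keyboard[src]
--     ty, tx = keyboard[dest]
--     dy = abs(sy - ty)
--     dx = abs(sx - tx)
--     if dx == 0 and dy == 0:
--         return 1
--     return 3 * min(dx, dy) + 2 * abs(dx - dy)
-- ===== Notes on version B (the rewrite author's own statement) =====
-- stated objective: simpler
-- what changed: Replaces A's branch chain and while-loop countdown (3 per shared diagonal step, then 2 per leftover straight step) with one closed-form arithmetic expression 3*min(dx,dy)+2*|dx-dy|.
import Mathlib
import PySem

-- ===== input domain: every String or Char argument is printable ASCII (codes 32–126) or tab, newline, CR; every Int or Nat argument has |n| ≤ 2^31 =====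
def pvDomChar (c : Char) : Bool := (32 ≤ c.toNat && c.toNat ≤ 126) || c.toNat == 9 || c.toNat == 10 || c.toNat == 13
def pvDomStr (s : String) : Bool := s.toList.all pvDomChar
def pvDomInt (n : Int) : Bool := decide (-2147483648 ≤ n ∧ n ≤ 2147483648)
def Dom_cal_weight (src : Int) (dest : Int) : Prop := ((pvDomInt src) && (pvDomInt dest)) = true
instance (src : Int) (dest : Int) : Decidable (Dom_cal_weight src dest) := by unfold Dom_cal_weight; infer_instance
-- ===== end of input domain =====

-- B replaces A's branch chain and while-loop countdown with one closed-form expression (objective: simpler).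

-- ===== PORT A =====
def keyboardA : PySem.Dict Int (Int × Int) :=
  PySem.Dict.ofList
   [(1,(0,0)), (2,(0,1)), (3,(0,2)),
    (4,(1,0)), (5,(1,1)), (6,(1,2)),
    (7,(2,0)), (8,(2,1)), (9,(2,2)),
    (0,(3,1))]

-- abs() on ints, written so the kernel reduces it (Mathlib's |·| does not)
def pyAbs (x : Int) : Int := if x < 0 then -x else x

-- the while loop of A; it is only ever entered with diff_y, diff_x ≥ 0 (they are
-- absolute values), so the guard `0 < … ∧ 0 < …` coincides with Python's `≠ 0 and ≠ 0`
-- on every reachable state; the Nat fuel (diff_x.toNat at the call site) is a pure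
-- totality device and is never exhausted while the guard holds.
def loopA : Nat → Int → Int → Int → Int
  | fuel + 1, diff_y, diff_x, weight =>
    if 0 < diff_y ∧ 0 < diff_x then
      loopA fuel (diff_y - 1) (diff_x - 1) (weight + 3)
    else
      if diff_x = 0 then weight + 2 * diff_y
      else if diff_y = 0 then weight + 2 * diff_x
      else weight
  | 0, diff_y, diff_x, weight =>
      if diff_x = 0 then weight + 2 * diff_y
      else if diff_y = 0 then weight + 2 * diff_x
      else weight

def cal_weight (src : Int) (dest : Int) : Int :=
  -- keyboard[src] raises KeyError for keys outside 0..9; Pre_ excludes those inputs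
  let src_pos := (PySem.Dict.get? keyboardA src).getD (0, 0)
  let dest_pos := (PySem.Dict.get? keyboardA dest).getD (0, 0)
  let diff_y := pyAbs (src_pos.1 - dest_pos.1)
  let diff_x := pyAbs (src_pos.2 - dest_pos.2)
  if diff_x = 0 ∧ diff_y = 0 then 1
  else if diff_x = 0 then 2 * diff_y
  else if diff_y = 0 then 2 * diff_x
  else loopA diff_x.toNat diff_y diff_x 0

-- ===== PORT B =====
def cal_weight_alt (src : Int) (dest : Int) : Int :=
  let sp := (PySem.Dict.get? keyboardA src).getD (0, 0)
  let tp := (PySem.Dict.get? keyboardA dest).getD (0, 0)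
  let dy := pyAbs (sp.1 - tp.1)
  let dx := pyAbs (sp.2 - tp.2)
  if dx = 0 ∧ dy = 0 then 1
  else 3 * min dx dy + 2 * pyAbs (dx - dy)

-- ===== PRECONDITION & SPEC =====
-- Pre_ excludes exactly the inputs where Python's keyboard[..] raises KeyError (keys outside 0..9).
def Pre_cal_weight (src : Int) (dest : Int) : Prop :=
  0 ≤ src ∧ src ≤ 9 ∧ 0 ≤ dest ∧ dest ≤ 9
instance (src : Int) (dest : Int) : Decidable (Pre_cal_weight src dest) := by
  unfold Pre_cal_weight; infer_instance

def pvWitness_cal_weight : Int × Int := (1, 8)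

def Spec_cal_weight (src : Int) (dest : Int) (out : Int) : Prop := out = cal_weight_alt src dest
instance (src : Int) (dest : Int) (out : Int) : Decidable (Spec_cal_weight src dest out) := by
  unfold Spec_cal_weight; infer_instance

-- ===== CLAIM (what is proved, stated in full; the proofs are below) =====
def Claim_equal_cal_weight : Prop := ∀ (src : Int) (dest : Int), Dom_cal_weight src dest → Pre_cal_weight src dest → Spec_cal_weight src dest (cal_weight src dest)

-- ===== LEMMAS AND PROOFS =====

-- ===== VERDICT (by name: the statement is the Claim_ definition above) =====
theorem cal_weight_spec : Claim_equal_cal_weight := by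
  intro src dest _ hpre
  obtain ⟨h1, h2, h3, h4⟩ := hpre
  unfold Spec_cal_weight
  interval_cases src <;> interval_cases dest <;> decide
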